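-- pv_equiv track=rewrite | github.com/2D-Gater/KALI | utils/chunking.py | split_config_lines
-- ===== SOURCE A (Python) =====
-- from typing import List, Dict, Iterable, Optional
--
-- DEFAULT_MAX_TOKENS = 500
--
-- def split_config_lines(text: str, approx_line_tokens: int = 16, target_tokens: int = DEFAULT_MAX_TOKENS) -> List[str]:
--     """
--     配置/日志：按行聚合成接近 target_tokens 的块（粗略），再交给 token 控制精修。
--     """
--     lines = text.splitlines()
--     blocks: List[str] = []
--     buf: List[str] = []
--     budget_lines = max(target_tokens // max(approx_line_tokens, 1), 16)  # 至少 16 行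
--     for ln in lines:
--         buf.append(ln)
--         if len(buf) >= budget_lines:
--             block = "\n".join(buf).strip("\n")
--             if block:
--                 blocks.append(block)
--             buf = []
--     if buf:
--         block = "\n".join(buf).strip("\n")
--         if block:
--             blocks.append(block)
--     return blocks or [text]
-- ===== SOURCE B (Python) =====
-- DEFAULT_MAX_TOKENS = 500
--
-- def split_config_lines(text: str, approx_line_tokens: int = 16, target_tokens: int = DEFAULT_MAX_TOKENS):
--     """Fixed-stride slicing over line indices instead of an append-to-buffer/flush loop."""
--     lines = text.splitlines()
--     budget_lines = max(target_tokens // max(approx_line_tokens, 1), 16)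
--     blocks = []
--     for i in range(0, len(lines), budget_lines):
--         block = "\n".join(lines[i:i + budget_lines]).strip("\n")
--         if block:
--             blocks.append(block)
--     return blocks or [text]
-- ===== Notes on version B (the rewrite author's own statement) =====
-- stated objective: simpler
-- what changed: Replaced the element-by-element buffer accumulation with flush-on-threshold by direct fixed-stride index slicing: one for-loop over range(0, len(lines), budget_lines) joining each slice, keeping the empty-block filter and the `or [text]` fallback.
import Mathlib
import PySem

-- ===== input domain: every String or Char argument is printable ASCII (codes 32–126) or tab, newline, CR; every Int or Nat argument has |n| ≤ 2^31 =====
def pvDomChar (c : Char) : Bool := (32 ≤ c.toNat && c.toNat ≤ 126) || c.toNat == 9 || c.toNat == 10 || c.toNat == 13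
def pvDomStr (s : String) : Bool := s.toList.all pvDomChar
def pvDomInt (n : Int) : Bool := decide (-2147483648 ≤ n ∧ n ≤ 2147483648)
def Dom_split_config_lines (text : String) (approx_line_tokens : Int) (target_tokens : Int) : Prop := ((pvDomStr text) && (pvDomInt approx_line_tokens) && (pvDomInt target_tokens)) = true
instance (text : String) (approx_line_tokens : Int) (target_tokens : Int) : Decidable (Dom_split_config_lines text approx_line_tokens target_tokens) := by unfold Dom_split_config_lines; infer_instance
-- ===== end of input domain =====

-- B replaces A's append-to-buffer/flush-on-threshold loop by fixed-stride index slicing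
-- over range(0, len(lines), budget_lines); same return value, objective: simpler.

-- ===== PORT A =====
def split_config_lines (text : String) (approx_line_tokens : Int) (target_tokens : Int) : List String :=
  let lines := PySem.Str.splitlines text
  let budget_lines : Int := max (PySem.Int.floordiv target_tokens (max approx_line_tokens 1)) 16
  let st := lines.foldl
    (fun (st : List String × List String) ln =>
      let buf := st.2 ++ [ln]
      if budget_lines ≤ (buf.length : Int) then
        let block := PySem.Str.stripChars (PySem.Str.join "\n" buf) "\n"
        (if block ≠ "" then st.1 ++ [block] else st.1, [])
      else
        (st.1, buf))
    ([], [])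
  let blocks :=
    if st.2 ≠ [] then
      let block := PySem.Str.stripChars (PySem.Str.join "\n" st.2) "\n"
      if block ≠ "" then st.1 ++ [block] else st.1
    else st.1
  if blocks ≠ [] then blocks else [text]

-- ===== PORT B =====
def split_config_lines_alt (text : String) (approx_line_tokens : Int) (target_tokens : Int) : List String :=
  let lines := PySem.Str.splitlines text
  let budget_lines : Int := max (PySem.Int.floordiv target_tokens (max approx_line_tokens 1)) 16
  let blocks := (PySem.List.pyRange 0 (lines.length : Int) budget_lines).foldl
    (fun blocks i =>
      let block := PySem.Str.stripChars
        (PySem.Str.join "\n" (PySem.List.slice lines (some i) (some (i + budget_lines)))) "\n"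
      if block ≠ "" then blocks ++ [block] else blocks)
    []
  if blocks ≠ [] then blocks else [text]

-- ===== PRECONDITION & SPEC =====
def Spec_split_config_lines (text : String) (approx_line_tokens : Int) (target_tokens : Int) (out : List String) : Prop := out = split_config_lines_alt text approx_line_tokens target_tokens
instance (text : String) (approx_line_tokens : Int) (target_tokens : Int) (out : List String) : Decidable (Spec_split_config_lines text approx_line_tokens target_tokens out) := by unfold Spec_split_config_lines; infer_instance

-- ===== CLAIM (what is proved, stated in full; the proofs are below) =====
def Claim_equal_split_config_lines : Prop := ∀ (text : String) (approx_line_tokens : Int) (target_tokens : Int), Dom_split_config_lines text approx_line_tokens target_tokens → Spec_split_config_lines text approx_line_tokens target_tokens (split_config_lines text approx_line_tokens target_tokens)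

-- ===== LEMMAS AND PROOFS =====

-- the block a group of lines produces, and appending it when non-empty
def pvBlock (buf : List String) : String :=
  PySem.Str.stripChars (PySem.Str.join "\n" buf) "\n"

def pvEmit (acc buf : List String) : List String :=
  if pvBlock buf ≠ "" then acc ++ [pvBlock buf] else acc

-- A's loop body
def pvStep (budget : Int) (st : List String × List String) (ln : String) : List String × List String :=
  if budget ≤ ((st.2 ++ [ln]).length : Int) then (pvEmit st.1 (st.2 ++ [ln]), []) else (st.1, st.2 ++ [ln])

-- A's final flush
def pvFinal (st : List String × List String) : List String :=
  if st.2 ≠ [] then pvEmit st.1 st.2 else st.1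

-- common reference form: process the lines chunk by chunk of b lines
def pvChunks (b : Nat) (hb : 0 < b) (ls acc : List String) : List String :=
  if ls = [] then acc else pvChunks b hb (ls.drop b) (pvEmit acc (ls.take b))
termination_by ls.length
decreasing_by rename_i h; cases ls with
  | nil => exact absurd rfl h
  | cons x xs => simp; omega

theorem pvA_eq (text : String) (a t : Int) :
    split_config_lines text a t =
      (let lines := PySem.Str.splitlines text
       let budget : Int := max (PySem.Int.floordiv t (max a 1)) 16
       let blocks := pvFinal (lines.foldl (pvStep budget) ([], []))
       if blocks ≠ [] then blocks else [text]) := rfl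

theorem pvB_eq (text : String) (a t : Int) :
    split_config_lines_alt text a t =
      (let lines := PySem.Str.splitlines text
       let budget : Int := max (PySem.Int.floordiv t (max a 1)) 16
       let blocks := (PySem.List.pyRange 0 (lines.length : Int) budget).foldl
         (fun acc i => pvEmit acc (PySem.List.slice lines (some i) (some (i + budget)))) []
       if blocks ≠ [] then blocks else [text]) := rfl

-- pyRange with a positive step: nil and cons forms
theorem pvRange_pos_nil (a b s : Int) (hs : 0 < s) (hba : b ≤ a) :
    PySem.List.pyRange a b s = [] := by
  rw [PySem.List.pyRange_of_pos _ _ hs, if_neg (not_lt.mpr hba)]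
  simp

theorem pvRange_pos_cons (a b s : Int) (hs : 0 < s) (hab : a < b) :
    PySem.List.pyRange a b s = a :: PySem.List.pyRange (a + s) b s := by
  rw [PySem.List.pyRange_of_pos _ _ hs, PySem.List.pyRange_of_pos _ _ hs, if_pos hab]
  have hdiv : (b - a + s - 1) / s = (b - a - 1) / s + 1 := by
    have h : b - a + s - 1 = (b - a - 1) + 1 * s := by ring
    rw [h, Int.add_mul_ediv_right _ _ (by omega : s ≠ 0)]
  have hnn : 0 ≤ (b - a - 1) / s := Int.ediv_nonneg (by omega) (by omega)
  have h1 : ((b - a + s - 1) / s).toNat = ((b - a - 1) / s).toNat + 1 := by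
    rw [hdiv]; omega
  have h2 : (if a + s < b then ((b - (a + s) + s - 1) / s).toNat else 0)
      = ((b - a - 1) / s).toNat := by
    by_cases h : a + s < b
    · rw [if_pos h]; congr 1; ring_nf
    · rw [if_neg h]
      have : (b - a - 1) / s = 0 := Int.ediv_eq_zero_of_lt (by omega) (by omega)
      omega
  rw [h1, h2, List.range_succ_eq_map]
  simp only [List.map_cons, List.map_map, Nat.cast_zero, mul_zero, add_zero]
  congr 1
  apply List.map_congr_left
  intro k _
  simp [Function.comp]
  ring

-- A's loop: a full chunk of b lines is consumed and flushed
theorem pvA_consume (budget : Int) (b : Nat) (hbb : (b : Int) = budget)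
    (ls : List String) (buf acc : List String)
    (hlt : buf.length < b) (hge : b ≤ buf.length + ls.length) :
    ls.foldl (pvStep budget) (acc, buf) =
      (ls.drop (b - buf.length)).foldl (pvStep budget)
        (pvEmit acc (buf ++ ls.take (b - buf.length)), []) := by
  induction ls generalizing buf acc with
  | nil => simp at hge; omega
  | cons x ls' ih =>
    simp only [List.foldl_cons]
    by_cases h : buf.length + 1 = b
    · have hstep : pvStep budget (acc, buf) x = (pvEmit acc (buf ++ [x]), []) := by
        simp only [pvStep]
        rw [if_pos (by simp [List.length_append]; omega)]
      rw [hstep]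
      have h1 : b - buf.length = 1 := by omega
      rw [h1]
      simp
    · have hstep : pvStep budget (acc, buf) x = (acc, buf ++ [x]) := by
        simp only [pvStep]
        rw [if_neg (by simp [List.length_append]; omega)]
      rw [hstep]
      rw [ih (buf ++ [x]) acc (by simp; omega) (by simp at hge ⊢; omega)]
      obtain ⟨k, hk⟩ : ∃ k, b - buf.length = k + 1 := ⟨b - buf.length - 1, by omega⟩
      rw [hk]
      have hk' : b - (buf ++ [x]).length = k := by simp; omega
      rw [hk']
      simp [List.append_assoc]

-- A's loop: a partial chunk stays in the buffer
theorem pvA_rest (budget : Int) (b : Nat) (hbb : (b : Int) = budget)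
    (ls : List String) (buf acc : List String) (hlt : buf.length + ls.length < b) :
    ls.foldl (pvStep budget) (acc, buf) = (acc, buf ++ ls) := by
  induction ls generalizing buf with
  | nil => simp
  | cons x ls' ih =>
    simp only [List.foldl_cons]
    have hstep : pvStep budget (acc, buf) x = (acc, buf ++ [x]) := by
      simp only [pvStep]
      rw [if_neg (by simp [List.length_append] at hlt ⊢; omega)]
    rw [hstep, ih (buf ++ [x]) (by simp at hlt ⊢; omega)]
    simp

-- A's whole loop + final flush = chunked processing
theorem pvA_chunks (budget : Int) (b : Nat) (hbb : (b : Int) = budget) (hb : 0 < b)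
    (n : Nat) (ls acc : List String) (hn : ls.length ≤ n) :
    pvFinal (ls.foldl (pvStep budget) (acc, [])) = pvChunks b hb ls acc := by
  induction n generalizing ls acc with
  | zero =>
    have : ls = [] := List.length_eq_zero_iff.mp (by omega)
    subst this
    simp [pvFinal, pvChunks]
  | succ n ih =>
    by_cases hnil : ls = []
    · subst hnil; simp [pvFinal, pvChunks]
    · by_cases hsmall : ls.length < b
      · rw [pvA_rest budget b hbb ls [] acc (by simpa using hsmall)]
        rw [pvChunks]
        rw [if_neg hnil]
        rw [List.take_of_length_le (by omega), List.drop_eq_nil_of_le (by omega)]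
        rw [pvChunks, if_pos rfl]
        simp [pvFinal, hnil]
      · rw [pvA_consume budget b hbb ls [] acc (by simpa using hb) (by simp; omega)]
        simp only [List.nil_append, List.length_nil, Nat.sub_zero]
        rw [ih (ls.drop b) _ (by simp; omega)]
        conv_rhs => rw [pvChunks]
        rw [if_neg hnil]

-- B's loop from index j = chunked processing of the remaining lines
theorem pvB_chunks (budget : Int) (b : Nat) (hbb : (b : Int) = budget) (hb : 0 < b)
    (lines : List String) (n : Nat) (j : Nat) (acc : List String)
    (hn : lines.length - j ≤ n) :
    (PySem.List.pyRange (j : Int) (lines.length : Int) budget).foldl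
        (fun acc i => pvEmit acc (PySem.List.slice lines (some i) (some (i + budget)))) acc
      = pvChunks b hb (lines.drop j) acc := by
  induction n generalizing j acc with
  | zero =>
    have hj : lines.length ≤ j := by omega
    rw [pvRange_pos_nil _ _ _ (by omega) (by exact_mod_cast hj)]
    rw [List.drop_eq_nil_of_le hj]
    simp [pvChunks]
  | succ n ih =>
    by_cases hj : lines.length ≤ j
    · rw [pvRange_pos_nil _ _ _ (by omega) (by exact_mod_cast hj)]
      rw [List.drop_eq_nil_of_le hj]
      simp [pvChunks]
    · have hjl : j < lines.length := by omega
      rw [pvRange_pos_cons _ _ _ (by omega) (by exact_mod_cast hjl)]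
      simp only [List.foldl_cons]
      have hslice : PySem.List.slice lines (some (j : Int)) (some ((j : Int) + budget))
          = (lines.drop j).take b := by
        rw [← hbb, PySem.List.slice_natCast_add]
      have hcast : (j : Int) + budget = ((j + b : Nat) : Int) := by
        rw [← hbb]; push_cast; ring
      rw [hslice, hcast, ih (j + b) (pvEmit acc ((lines.drop j).take b)) (by omega)]
      conv_rhs => rw [pvChunks]
      rw [if_neg (show ¬(lines.drop j = []) from by simp; omega)]
      have hdd : (lines.drop j).drop b = lines.drop (j + b) := by
        rw [List.drop_drop]
      rw [hdd]

-- ===== VERDICT (by name: the statement is the Claim_ definition above) =====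
theorem split_config_lines_spec : Claim_equal_split_config_lines := by
  unfold Claim_equal_split_config_lines
  intro text a t _
  unfold Spec_split_config_lines
  rw [pvA_eq, pvB_eq]
  simp only []
  set lines := PySem.Str.splitlines text with hlines
  set budget : Int := max (PySem.Int.floordiv t (max a 1)) 16 with hbudget
  have h16 : (16 : Int) ≤ budget := le_max_right _ _
  have hbb : ((budget.toNat : Int)) = budget := Int.toNat_of_nonneg (by omega)
  have hb : 0 < budget.toNat := by omega
  rw [pvA_chunks budget budget.toNat hbb hb lines.length lines [] le_rfl]
  rw [show ((0 : Int)) = ((0 : Nat) : Int) from rfl,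
    pvB_chunks budget budget.toNat hbb hb lines lines.length 0 [] (by omega)]
  rw [List.drop_zero]
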